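-- pv_equiv track=rewrite | github.com/Vinix24/vnx-orchestration | scripts/lib/pr_queue_state.py | _build_queued_features
-- ===== SOURCE A (Python) =====
-- from typing import Any, Dict, List, Optional
--
-- def _build_queued_features(
--     register_events: List[Dict[str, Any]],
-- ) -> List[Dict[str, Any]]:
--     """Derive queued features — dispatches not yet in a terminal state."""
--     terminal_events = {"dispatch_completed", "dispatch_failed", "pr_merged"}
--     by_dispatch: Dict[str, Dict[str, Any]] = {}
--     for ev in register_events:
--         did = ev.get("dispatch_id", "").strip()
--         if not did:
--             continue
--         entry = by_dispatch.setdefault(did, {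
--             "dispatch_id": did,
--             "feature_id": "",
--             "status": "unknown",
--             "latest_ts": "",
--         })
--         ts = ev.get("timestamp", "")
--         if ts > entry["latest_ts"]:
--             entry["latest_ts"] = ts
--             entry["status"] = ev.get("event", "unknown")
--         if ev.get("feature_id"):
--             entry["feature_id"] = ev["feature_id"]
--
--     return [
--         {"dispatch_id": e["dispatch_id"], "feature_id": e["feature_id"], "status": e["status"]}
--         for e in by_dispatch.values()
--         if e["status"] not in terminal_events
--     ]
-- ===== SOURCE B (Python) =====
-- from typing import Any, Dict, List
--
-- def _build_queued_features(
--     register_events: List[Dict[str, Any]],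
-- ) -> List[Dict[str, Any]]:
--     """Group events by dispatch, then per group pick the status of the first
--     event with maximal timestamp and the last truthy feature_id."""
--     terminal_events = {"dispatch_completed", "dispatch_failed", "pr_merged"}
--     groups: Dict[str, List[Dict[str, Any]]] = {}
--     for ev in register_events:
--         did = ev.get("dispatch_id", "").strip()
--         if did:
--             groups.setdefault(did, []).append(ev)
--     queued: List[Dict[str, Any]] = []
--     for did, evs in groups.items():
--         top = max(evs, key=lambda e: e.get("timestamp", ""))
--         status = top.get("event", "unknown") if top.get("timestamp", "") else "unknown"
--         feature = next((e["feature_id"] for e in reversed(evs) if e.get("feature_id")), "")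
--         if status not in terminal_events:
--             queued.append({"dispatch_id": did, "feature_id": feature, "status": status})
--     return queued
-- ===== Notes on version B (the rewrite author's own statement) =====
-- stated objective: alternative
-- what changed: B replaces A's single pass that incrementally maintains a latest-timestamp/status/feature entry per dispatch by a group-then-analyze decomposition: it first indexes events by non-empty stripped dispatch_id, then per group selects the status via max-by-timestamp (first maximal element) and the feature_id via a reversed scan for the last truthy value, and finally filters out terminal statuses.
import Mathlib
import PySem

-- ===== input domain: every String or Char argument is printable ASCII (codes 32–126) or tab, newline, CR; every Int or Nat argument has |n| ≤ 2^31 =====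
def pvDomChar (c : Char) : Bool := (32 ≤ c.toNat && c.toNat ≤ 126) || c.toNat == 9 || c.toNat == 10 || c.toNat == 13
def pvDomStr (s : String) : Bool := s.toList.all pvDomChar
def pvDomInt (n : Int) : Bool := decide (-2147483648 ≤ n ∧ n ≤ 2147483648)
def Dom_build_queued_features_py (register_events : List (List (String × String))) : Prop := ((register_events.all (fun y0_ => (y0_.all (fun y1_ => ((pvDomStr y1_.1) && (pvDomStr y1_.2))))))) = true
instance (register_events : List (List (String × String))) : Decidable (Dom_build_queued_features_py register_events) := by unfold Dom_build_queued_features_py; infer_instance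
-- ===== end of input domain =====

-- B replaces A's single pass (incrementally maintained latest-ts/status/feature per dispatch) by a
-- group-then-analyze decomposition: index events by dispatch_id, then per group take max-by-timestamp
-- and a reversed scan for the last truthy feature_id; objective: alternative (same cost, different shape).

-- ===== PORT A =====
-- ev.get(k, dflt) on the event dict (association list, first match)
def pvEvGet? (ev : List (String × String)) (k : String) : Option String :=
  (ev.find? (fun p => p.1 == k)).map (fun p => p.2)

def pvEvGetD (ev : List (String × String)) (k dflt : String) : String :=
  (pvEvGet? ev k).getD dflt

-- terminal_events = {"dispatch_completed", "dispatch_failed", "pr_merged"} (same literal in A and B)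
def pvTerminal : PySem.Set String :=
  PySem.Set.ofList ["dispatch_completed", "dispatch_failed", "pr_merged"]

-- the entry dict has the four fixed keys (dispatch_id, feature_id, status, latest_ts): a 4-tuple
-- the body of A's loop acting on the entry (ts / status update, then feature_id update)
def pvEntryStep (entry : String × String × String × String) (ev : List (String × String)) :
    String × String × String × String :=
  let ts := pvEvGetD ev "timestamp" ""
  let entry := if entry.2.2.2 < ts then (entry.1, entry.2.1, pvEvGetD ev "event" "unknown", ts) else entry
  match pvEvGet? ev "feature_id" with
  | some f => if f ≠ "" then (entry.1, f, entry.2.2.1, entry.2.2.2) else entry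
  | none => entry

-- A's loop body: skip empty stripped dispatch_id, setdefault + in-place mutation = getD then insert
def pvStepA (d : PySem.Dict String (String × String × String × String))
    (ev : List (String × String)) : PySem.Dict String (String × String × String × String) :=
  let did := PySem.Str.strip (pvEvGetD ev "dispatch_id" "")
  if did = "" then d
  else d.insert did (pvEntryStep (d.getD did (did, "", "unknown", "")) ev)

def build_queued_features_py (register_events : List (List (String × String))) :
    List (List (String × String)) :=
  let by_dispatch := register_events.foldl pvStepA PySem.Dict.empty
  ((by_dispatch.values).filter (fun e => !(PySem.Set.contains pvTerminal e.2.2.1))).map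
    (fun e => [("dispatch_id", e.1), ("feature_id", e.2.1), ("status", e.2.2.1)])

-- ===== PORT B =====
-- groups.setdefault(did, []).append(ev)
def pvStepB (g : PySem.Dict String (List (List (String × String))))
    (ev : List (String × String)) : PySem.Dict String (List (List (String × String))) :=
  let did := PySem.Str.strip (pvEvGetD ev "dispatch_id" "")
  if did = "" then g
  else g.insert did (g.getD did [] ++ [ev])

-- bool(ev.get("feature_id"))
def pvTruthyFeature (ev : List (String × String)) : Bool :=
  match pvEvGet? ev "feature_id" with
  | some f => f != ""
  | none => false

-- top.get("event","unknown") if top.get("timestamp","") else "unknown"; none-case is a totality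
-- guard only (Source B's groups are never empty, so max never sees an empty list)
def pvStatusOf (evs : List (List (String × String))) : String :=
  match PySem.List.max? evs (fun e => pvEvGetD e "timestamp" "") with
  | some top => if pvEvGetD top "timestamp" "" ≠ "" then pvEvGetD top "event" "unknown" else "unknown"
  | none => "unknown"

-- next((e["feature_id"] for e in reversed(evs) if e.get("feature_id")), "")
def pvFeatureOf (evs : List (List (String × String))) : String :=
  ((evs.reverse.find? pvTruthyFeature).map (fun e => pvEvGetD e "feature_id" "")).getD ""

def build_queued_features_py_alt (register_events : List (List (String × String))) :
    List (List (String × String)) :=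
  let groups := register_events.foldl pvStepB PySem.Dict.empty
  groups.items.foldl (fun queued p =>
    let status := pvStatusOf p.2
    if PySem.Set.contains pvTerminal status then queued
    else queued ++ [[("dispatch_id", p.1), ("feature_id", pvFeatureOf p.2), ("status", status)]]) []

-- ===== PRECONDITION & SPEC =====
def Spec_build_queued_features_py (register_events : List (List (String × String))) (out : List (List (String × String))) : Prop := out = build_queued_features_py_alt register_events
instance (register_events : List (List (String × String))) (out : List (List (String × String))) : Decidable (Spec_build_queued_features_py register_events out) := by unfold Spec_build_queued_features_py; infer_instance

-- ===== CLAIM (what is proved, stated in full; the proofs are below) =====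
def Claim_equal_build_queued_features_py : Prop := ∀ (register_events : List (List (String × String))), Dom_build_queued_features_py register_events → Spec_build_queued_features_py register_events (build_queued_features_py register_events)

-- ===== LEMMAS AND PROOFS =====

-- A's entry for one dispatch group, as a fold of its events
def pvEntryOf (did : String) (evs : List (List (String × String))) :
    String × String × String × String :=
  evs.foldl pvEntryStep (did, "", "unknown", "")

-- the latest_ts field, expressed through B's max?
def pvLatestOf (evs : List (List (String × String))) : String :=
  match PySem.List.max? evs (fun e => pvEvGetD e "timestamp" "") with
  | some top => pvEvGetD top "timestamp" ""
  | none => ""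

lemma pv_max?_append (evs : List (List (String × String))) (e : List (String × String))
    (key : List (String × String) → String) :
    PySem.List.max? (evs ++ [e]) key =
      match PySem.List.max? evs key with
      | none => some e
      | some m => if key m < key e then some e else some m := by
  cases h : PySem.List.max? evs key with
  | none => rw [PySem.List.max?] at h; rw [PySem.List.max?, List.foldl_append, h]; rfl
  | some m => rw [PySem.List.max?] at h; rw [PySem.List.max?, List.foldl_append, h]; rfl

lemma pv_nil_lt (l : List Char) : (([] : List Char) < l) ↔ l ≠ [] := by
  cases l <;> simp

lemma pv_nil_le (l : List Char) : ([] : List Char) ≤ l := by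
  cases l with
  | nil => exact le_refl _
  | cons a t => exact le_of_lt ((pv_nil_lt _).mpr (by simp))

lemma pv_entryOf_eq (did : String) (evs : List (List (String × String))) :
    pvEntryOf did evs = (did, pvFeatureOf evs, pvStatusOf evs, pvLatestOf evs) := by
  induction evs using List.reverseRecOn with
  | nil => simp [pvEntryOf, pvFeatureOf, pvStatusOf, pvLatestOf, PySem.List.max?]
  | append_singleton evs e ih =>
      have hstep : pvEntryOf did (evs ++ [e]) = pvEntryStep (pvEntryOf did evs) e := by
        simp [pvEntryOf, List.foldl_append]
      rw [hstep, ih]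
      have hfeat : pvFeatureOf (evs ++ [e]) =
          (if pvTruthyFeature e then pvEvGetD e "feature_id" "" else pvFeatureOf evs) := by
        by_cases h : pvTruthyFeature e <;> simp [pvFeatureOf, List.find?_cons, h]
      rw [hfeat,
        show pvStatusOf (evs ++ [e]) =
          match PySem.List.max? (evs ++ [e]) (fun e => pvEvGetD e "timestamp" "") with
          | some top => if pvEvGetD top "timestamp" "" ≠ "" then pvEvGetD top "event" "unknown" else "unknown"
          | none => "unknown" from rfl,
        show pvLatestOf (evs ++ [e]) =
          match PySem.List.max? (evs ++ [e]) (fun e => pvEvGetD e "timestamp" "") with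
          | some top => pvEvGetD top "timestamp" ""
          | none => "" from rfl,
        pv_max?_append]
      cases hm : PySem.List.max? evs (fun e => pvEvGetD e "timestamp" "") with
      | none =>
          have hnil : evs = [] := (PySem.List.max?_eq_none_iff _ _).mp hm
          subst hnil
          by_cases hne : (pvEvGet? e "timestamp").getD "" = ""
          · cases hf : pvEvGet? e "feature_id" with
            | none => simp [pvEntryStep, pvStatusOf, pvLatestOf, pvTruthyFeature,
                PySem.List.max?, hne, hf, pvEvGetD]
            | some f =>
                by_cases hfe : f = "" <;>
                  simp [pvEntryStep, pvStatusOf, pvLatestOf, pvTruthyFeature,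
                    PySem.List.max?, hne, hf, hfe, pvEvGetD]
          · have ht' : (([] : List Char) < ((pvEvGet? e "timestamp").getD "").toList) := by
              rw [pv_nil_lt]
              simpa using hne
            cases hf : pvEvGet? e "feature_id" with
            | none => simp [pvEntryStep, pvStatusOf, pvLatestOf, pvTruthyFeature,
                PySem.List.max?, ht', hne, hf, pvEvGetD]
            | some f =>
                by_cases hfe : f = "" <;>
                  simp [pvEntryStep, pvStatusOf, pvLatestOf, pvTruthyFeature,
                    PySem.List.max?, ht', hne, hf, hfe, pvEvGetD]
      | some m =>
          have hlat : pvLatestOf evs = pvEvGetD m "timestamp" "" := by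
            simp [pvLatestOf, hm]
          simp only [pvEvGetD] at hm
          by_cases hlt : ((pvEvGet? m "timestamp").getD "").toList < ((pvEvGet? e "timestamp").getD "").toList
          · have ht' : (([] : List Char) < ((pvEvGet? e "timestamp").getD "").toList) :=
              lt_of_le_of_lt (pv_nil_le _) hlt
            have hne : ¬ ((pvEvGet? e "timestamp").getD "" = "") := by
              intro h
              rw [h] at ht'
              simp at ht'
            cases hf : pvEvGet? e "feature_id" with
            | none => simp [pvEntryStep, pvStatusOf, pvLatestOf, pvTruthyFeature,
                hlat, hlt, ht', hne, hf, hm, pvEvGetD]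
            | some f =>
                by_cases hfe : f = "" <;>
                  simp [pvEntryStep, pvStatusOf, pvLatestOf, pvTruthyFeature,
                    hlat, hlt, ht', hne, hf, hfe, hm, pvEvGetD]
          · cases hf : pvEvGet? e "feature_id" with
            | none => simp [pvEntryStep, pvStatusOf, pvLatestOf, pvTruthyFeature,
                hlat, hlt, hm, hf, pvEvGetD]
            | some f =>
                by_cases hfe : f = "" <;>
                  simp [pvEntryStep, pvStatusOf, pvLatestOf, pvTruthyFeature,
                    hlat, hlt, hm, hf, hfe, pvEvGetD]

-- relating A's dict of entries to B's dict of groups, pointwise on the underlying lists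
def pvEmap (p : String × List (List (String × String))) : String × (String × String × String × String) :=
  (p.1, pvEntryOf p.1 p.2)

def pvMapD (g : PySem.Dict String (List (List (String × String)))) :
    PySem.Dict String (String × String × String × String) :=
  PySem.Dict.mk (g.items.map pvEmap)

lemma pv_get?_mapD (L : List (String × List (List (String × String)))) (k : String) :
    (PySem.Dict.mk (L.map pvEmap)).get? k =
      ((PySem.Dict.mk L).get? k).map (fun evs => pvEntryOf k evs) := by
  induction L with
  | nil => simp [PySem.Dict.get?]
  | cons p rest ih =>
      rcases p with ⟨a, b⟩
      by_cases h : a = k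
      · subst h
        simp [pvEmap, PySem.Dict.get?_mk_cons]
      · simp [pvEmap, PySem.Dict.get?_mk_cons, h, ih, (by simpa using h : (a == k) = false)]

lemma pv_contains_mapD (g : PySem.Dict String (List (List (String × String)))) (k : String) :
    (pvMapD g).contains k = g.contains k := by
  rw [PySem.Dict.contains_eq_isSome_get?, PySem.Dict.contains_eq_isSome_get?]
  rcases g with ⟨L⟩
  rw [show pvMapD ⟨L⟩ = PySem.Dict.mk (L.map pvEmap) from rfl, pv_get?_mapD]
  cases (PySem.Dict.mk L).get? k <;> simp

lemma pv_getD_mapD (g : PySem.Dict String (List (List (String × String)))) (k : String) :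
    (pvMapD g).getD k (k, "", "unknown", "") = pvEntryOf k (g.getD k []) := by
  rcases g with ⟨L⟩
  rw [PySem.Dict.getD_eq_get?_getD, PySem.Dict.getD_eq_get?_getD,
    show pvMapD ⟨L⟩ = PySem.Dict.mk (L.map pvEmap) from rfl, pv_get?_mapD]
  cases (PySem.Dict.mk L).get? k with
  | none => simp [pvEntryOf]
  | some evs => simp

lemma pv_step_comm (g : PySem.Dict String (List (List (String × String))))
    (ev : List (String × String)) :
    pvStepA (pvMapD g) ev = pvMapD (pvStepB g ev) := by
  rw [pvStepA, pvStepB]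
  by_cases hd : PySem.Str.strip (pvEvGetD ev "dispatch_id" "") = ""
  · simp [hd]
  · simp only [hd, if_neg hd, if_false]
    set did := PySem.Str.strip (pvEvGetD ev "dispatch_id" "") with hdid
    have hentry : pvEntryStep ((pvMapD g).getD did (did, "", "unknown", "")) ev =
        pvEntryOf did (g.getD did [] ++ [ev]) := by
      rw [pv_getD_mapD, pvEntryOf, pvEntryOf, List.foldl_append]
      rfl
    apply PySem.Dict.ext
    by_cases hc : g.contains did = true
    · rw [PySem.Dict.items_insert_of_contains _ _ (by rw [pv_contains_mapD]; exact hc),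
        show (pvMapD (g.insert did (g.getD did [] ++ [ev]))).items
          = (g.insert did (g.getD did [] ++ [ev])).items.map pvEmap from rfl,
        PySem.Dict.items_insert_of_contains _ _ hc,
        show (pvMapD g).items = g.items.map pvEmap from rfl]
      rw [List.map_map, List.map_map]
      apply List.map_congr_left
      intro p _
      by_cases hpk : (p.1 == did) = true
      · simp [pvEmap, hpk, hentry, Function.comp]
      · simp [pvEmap, hpk, Function.comp]
    · have hc' : g.contains did = false := by simpa using hc
      rw [PySem.Dict.items_insert_of_not_contains _ _ (by rw [pv_contains_mapD]; exact hc'),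
        show (pvMapD (g.insert did (g.getD did [] ++ [ev]))).items
          = (g.insert did (g.getD did [] ++ [ev])).items.map pvEmap from rfl,
        PySem.Dict.items_insert_of_not_contains _ _ hc',
        show (pvMapD g).items = g.items.map pvEmap from rfl]
      simp [pvEmap, hentry]

lemma pv_fold_comm (l : List (List (String × String)))
    (g : PySem.Dict String (List (List (String × String)))) :
    l.foldl pvStepA (pvMapD g) = pvMapD (l.foldl pvStepB g) := by
  induction l generalizing g with
  | nil => rfl
  | cons ev rest ih => rw [List.foldl_cons, List.foldl_cons, pv_step_comm, ih]

-- ===== VERDICT (by name: the statement is the Claim_ definition above) =====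
theorem build_queued_features_py_spec : Claim_equal_build_queued_features_py := by
  intro res _
  unfold Spec_build_queued_features_py
  unfold build_queued_features_py build_queued_features_py_alt
  rw [show (PySem.Dict.empty : PySem.Dict String (String × String × String × String))
      = pvMapD PySem.Dict.empty from rfl, pv_fold_comm]
  set G := res.foldl pvStepB PySem.Dict.empty with hG
  have hbody : ∀ (queued : List (List (String × String))) (p : String × List (List (String × String))),
      (fun queued p =>
        let status := pvStatusOf p.2
        if PySem.Set.contains pvTerminal status then queued
        else queued ++ [[("dispatch_id", p.1), ("feature_id", pvFeatureOf p.2), ("status", status)]]) queued p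
      = (if (!(PySem.Set.contains pvTerminal (pvStatusOf p.2))) = true
          then queued ++ [[("dispatch_id", p.1), ("feature_id", pvFeatureOf p.2), ("status", pvStatusOf p.2)]]
          else queued) := by
    intro queued p
    by_cases h : PySem.Set.contains pvTerminal (pvStatusOf p.2) <;> simp [h]
  rw [funext fun queued => funext fun p => hbody queued p, PySem.List.foldl_append_if]
  show List.map (fun e => [("dispatch_id", e.1), ("feature_id", e.2.1), ("status", e.2.2.1)])
      (List.filter (fun e => !PySem.Set.contains pvTerminal e.2.2.1) (pvMapD G).values) = _
  rw [show (pvMapD G).values = (G.items.map pvEmap).map (fun x => x.2) from PySem.Dict.values_mk _,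
    List.map_map, List.filter_map, List.map_map]
  simp only [Function.comp_def, pvEmap, pv_entryOf_eq, List.nil_append]
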